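-- pv_equiv track=rewrite | github.com/ssb98/ssb98_Programmers | 프로그래머스/0/120880. 특이한 정렬/특이한 정렬.py | solution
-- ===== SOURCE A (Python) =====
-- def solution(numlist, n):
--     answer = []
--     for i in range(10000):
--         if(n+i in numlist):
--             answer.append(n+i)
--         if(i!=0 and n-i in numlist):
--             answer.append(n-i)
--     return answer
-- ===== SOURCE B (Python) =====
-- def solution(numlist, n):
--     return sorted({x for x in numlist if abs(x - n) < 10000},
--                   key=lambda x: (abs(x - n), -x))
-- ===== Notes on version B (the rewrite author's own statement) =====
-- stated objective: faster
-- what changed: Replaces the 10000-iteration scan (two list membership tests per distance) with a set-comprehension dedup/filter of the input followed by one sort keyed on (abs(x-n), -x).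
import Mathlib
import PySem

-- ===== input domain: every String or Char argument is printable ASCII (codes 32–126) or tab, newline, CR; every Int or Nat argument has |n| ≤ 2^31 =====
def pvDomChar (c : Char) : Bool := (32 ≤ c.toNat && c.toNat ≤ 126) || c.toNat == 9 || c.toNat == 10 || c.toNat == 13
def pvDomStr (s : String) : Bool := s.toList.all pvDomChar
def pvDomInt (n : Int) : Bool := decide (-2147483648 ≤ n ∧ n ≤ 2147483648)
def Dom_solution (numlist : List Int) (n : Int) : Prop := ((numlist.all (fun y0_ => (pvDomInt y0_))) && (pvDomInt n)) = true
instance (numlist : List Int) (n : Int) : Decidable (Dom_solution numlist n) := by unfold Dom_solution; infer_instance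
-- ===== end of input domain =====

-- B replaces A's 10000-iteration membership scan with dedup + filter + one sort keyed on (abs(x-n), -x): asymptotically faster.


-- ===== PORT A =====
def solution (numlist : List Int) (n : Int) : List Int :=
  (PySem.List.pyRange 0 10000).foldl
    (fun answer i =>
      let answer := if (n + i) ∈ numlist then answer ++ [n + i] else answer
      if i ≠ 0 ∧ (n - i) ∈ numlist then answer ++ [n - i] else answer)
    []

-- ===== PORT B =====
def solution_alt (numlist : List Int) (n : Int) : List Int :=
  PySem.List.sorted2
    (PySem.Set.ofList (numlist.filter (fun x => decide (|x - n| < 10000))))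
    (fun x => |x - n|) (fun x => -x)

-- ===== PRECONDITION & SPEC =====
def Spec_solution (numlist : List Int) (n : Int) (out : List Int) : Prop := out = solution_alt numlist n
instance (numlist : List Int) (n : Int) (out : List Int) : Decidable (Spec_solution numlist n out) := by unfold Spec_solution; infer_instance

-- ===== CLAIM (what is proved, stated in full; the proofs are below) =====
def Claim_equal_solution : Prop := ∀ (numlist : List Int) (n : Int), Dom_solution numlist n → Spec_solution numlist n (solution numlist n)

-- ===== LEMMAS AND PROOFS =====

-- the two values A may append at distance i (in A's order)
def solGroup (numlist : List Int) (n : Int) (i : Int) : List Int :=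
  (if (n + i) ∈ numlist then [n + i] else []) ++
  (if i ≠ 0 ∧ (n - i) ∈ numlist then [n - i] else [])

-- A's lexicographic sort key, as a single linearly ordered key
def solKey (n : Int) (x : Int) : Lex (Int × Int) := toLex (|x - n|, -x)

lemma foldl_solBody (numlist : List Int) (n : Int) (l acc : List Int) :
    l.foldl (fun answer i =>
        let answer := if (n + i) ∈ numlist then answer ++ [n + i] else answer
        if i ≠ 0 ∧ (n - i) ∈ numlist then answer ++ [n - i] else answer) acc
      = acc ++ l.flatMap (solGroup numlist n) := by
  induction l generalizing acc with
  | nil => simp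
  | cons x t ih =>
    simp only [List.foldl_cons, List.flatMap_cons, ih]
    unfold solGroup
    split_ifs <;> simp

lemma solution_eq_flatMap (numlist : List Int) (n : Int) :
    solution numlist n = (PySem.List.pyRange 0 10000).flatMap (solGroup numlist n) := by
  unfold solution
  rw [foldl_solBody]
  exact List.nil_append _

lemma mem_solGroup {numlist : List Int} {n i x : Int} (hi : 0 ≤ i)
    (hx : x ∈ solGroup numlist n i) : x ∈ numlist ∧ |x - n| = i := by
  unfold solGroup at hx
  simp only [List.mem_append] at hx
  rcases hx with hx | hx <;> split_ifs at hx <;> simp_all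

lemma mem_flatMap_groups {numlist : List Int} {n x : Int} :
    x ∈ (PySem.List.pyRange 0 10000).flatMap (solGroup numlist n) ↔
      x ∈ numlist ∧ |x - n| < 10000 := by
  constructor
  · rintro hx
    rw [List.mem_flatMap] at hx
    obtain ⟨i, hi, hxi⟩ := hx
    rw [PySem.List.mem_pyRange_one] at hi
    obtain ⟨hmem, habs⟩ := mem_solGroup hi.1 hxi
    exact ⟨hmem, by omega⟩
  · rintro ⟨hmem, habs⟩
    rw [List.mem_flatMap]
    refine ⟨|x - n|, ?_, ?_⟩
    · rw [PySem.List.mem_pyRange_one]; constructor <;> [positivity; omega]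
    · unfold solGroup
      by_cases h : n ≤ x
      · have : n + |x - n| = x := by rw [abs_of_nonneg (by omega)]; omega
        simp [this, hmem]
      · have h1 : n - |x - n| = x := by rw [abs_of_neg (by omega)]; omega
        have h2 : |x - n| ≠ 0 := by rw [abs_of_neg (by omega)]; omega
        simp [h1, h2, hmem]

lemma pairwise_flatMap_groups (numlist : List Int) (n : Int) (N : Nat) :
    (((PySem.List.pyRange 0 (N : Int)).flatMap (solGroup numlist n)).Pairwise
        (fun a b => solKey n a < solKey n b)) ∧
      (∀ x ∈ (PySem.List.pyRange 0 (N : Int)).flatMap (solGroup numlist n), |x - n| < N) := by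
  induction N with
  | zero => simp [PySem.List.pyRange]
  | succ N ih =>
    rw [show ((N + 1 : Nat) : Int) = (N : Int) + 1 by push_cast; ring,
        PySem.List.pyRange_one_succ_right (by positivity), List.flatMap_append,
        List.flatMap_cons, List.flatMap_nil, List.append_nil]
    have hgrp : ∀ x ∈ solGroup numlist n (N : Int), |x - n| = (N : Int) := fun x hx =>
      (mem_solGroup (by positivity) hx).2
    constructor
    · rw [List.pairwise_append]
      refine ⟨ih.1, ?_, ?_⟩
      · -- within the group at distance N: n+N comes before n-N, and only when N ≠ 0
        unfold solGroup
        split_ifs with h1 h2 h2 <;> simp_all [solKey, Prod.Lex.lt_iff] <;> omega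
      · intro a ha b hb
        have h1 := ih.2 a ha
        have h2 := hgrp b (by simpa using hb)
        simp only [solKey, Prod.Lex.lt_iff, ofLex_toLex]
        left
        omega
    · intro x hx
      rcases List.mem_append.mp hx with h | h
      · have := ih.2 x h; omega
      · have := hgrp x (by simpa using h); omega

lemma nodup_flatMap_groups (numlist : List Int) (n : Int) :
    ((PySem.List.pyRange 0 10000).flatMap (solGroup numlist n)).Nodup := by
  have h := (pairwise_flatMap_groups numlist n 10000).1
  refine h.imp ?_
  intro a b hlt heq
  exact absurd (congrArg (solKey n) heq) (ne_of_lt hlt)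

-- sorted2 with Int keys is sorted with the lexicographic key
lemma sorted2_eq_sorted_lex (xs : List Int) (k1 k2 : Int → Int) :
    PySem.List.sorted2 xs k1 k2 = PySem.List.sorted xs (fun x => toLex (k1 x, k2 x)) := by
  show List.foldl (fun acc x => PySem.List.insertBy
        (fun a b => decide (k1 a < k1 b) || (!decide (k1 b < k1 a) && decide (k2 a < k2 b))) x acc) [] xs
      = List.foldl (fun acc x => PySem.List.insertBy
        (fun a b => decide ((fun x => toLex (k1 x, k2 x)) a < (fun x => toLex (k1 x, k2 x)) b)) x acc) [] xs
  have hcmp : (fun (a b : Int) => decide (k1 a < k1 b) || (!decide (k1 b < k1 a) && decide (k2 a < k2 b)))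
      = fun a b => decide ((fun x => toLex (k1 x, k2 x)) a < (fun x => toLex (k1 x, k2 x)) b) := by
    funext a b
    rw [Bool.eq_iff_iff]
    simp only [Bool.or_eq_true, Bool.and_eq_true, Bool.not_eq_true', decide_eq_true_eq,
      decide_eq_false_iff_not, Prod.Lex.lt_iff, ofLex_toLex]
    constructor
    · rintro (h | ⟨h1, h2⟩)
      · exact Or.inl h
      · rcases Int.lt_or_le (k1 a) (k1 b) with h' | h'
        · exact Or.inl h'
        · exact Or.inr ⟨by omega, h2⟩
    · rintro (h | ⟨h1, h2⟩)
      · exact Or.inl h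
      · exact Or.inr ⟨by omega, h2⟩
  simp only [hcmp]

-- ===== VERDICT (by name: the statement is the Claim_ definition above) =====
theorem solution_spec : Claim_equal_solution := by
  intro numlist n _
  show solution numlist n = solution_alt numlist n
  rw [solution_eq_flatMap]
  unfold solution_alt
  rw [sorted2_eq_sorted_lex]
  refine (PySem.List.sorted_eq_of_perm_of_pairwise_lt _ _ (solKey n) ?_ ?_).symm
  · rw [List.perm_ext_iff_of_nodup (nodup_flatMap_groups numlist n)
      (PySem.Set.nodup_ofList _)]
    intro a
    rw [mem_flatMap_groups, PySem.Set.mem_ofList, List.mem_filter]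
    simp only [decide_eq_true_eq]
  · exact (pairwise_flatMap_groups numlist n 10000).1
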